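-- pv_equiv track=rewrite | github.com/isaiahah/RegexCrosswordGenerator | RegexEntities/SolutionGrid.py | combine_to_clue
-- ===== SOURCE A (Python) =====
-- from typing import Dict, Tuple, List
--
-- def combine_to_clue(parts: List[str]) -> str:
--     """
--     Combine the given regular expression pieces into one regular expression.
--
--     Precondition: len(parts) > 0
--
--     :param parts: parts of the regular expression
--     :return: single regular expression containing all parts
--     """
--     combined = parts[0]
--     prev = parts[0]
--     done_last = "append"
--     for i in range(1, len(parts)):
--         curr = parts[i]
--         if curr != prev:
--             combined += curr
--             done_last = "append"
--         else:
--             if done_last == "append":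
--                 combined += "+"
--                 done_last = "add +"
--             if done_last == "add +":
--                 pass
--         prev = curr
--     return combined
-- ===== SOURCE B (Python) =====
-- def combine_to_clue(parts):
--     """Run-splitting: peel each maximal run of equal consecutive parts,
--     emit its element once followed by '+' iff the run is longer than 1."""
--     if not parts:
--         return ""
--     pieces = []
--     i, n = 0, len(parts)
--     while i < n:
--         head = parts[i]
--         j = i + 1
--         while j < n and parts[j] == head:
--             j += 1
--         pieces.append(head + ("+" if j - i > 1 else ""))
--         i = j
--     return "".join(pieces)
-- ===== Notes on version B (the rewrite author's own statement) =====
-- stated objective: simpler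
-- what changed: Replaces the done_last string state machine and index loop with a short recursion that peels the maximal run of the leading element and emits it once with '+' iff the run length exceeds 1.
-- outside the precondition, e.g. on combine_to_clue([]): A raises IndexError, B returns ''
import Mathlib
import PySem

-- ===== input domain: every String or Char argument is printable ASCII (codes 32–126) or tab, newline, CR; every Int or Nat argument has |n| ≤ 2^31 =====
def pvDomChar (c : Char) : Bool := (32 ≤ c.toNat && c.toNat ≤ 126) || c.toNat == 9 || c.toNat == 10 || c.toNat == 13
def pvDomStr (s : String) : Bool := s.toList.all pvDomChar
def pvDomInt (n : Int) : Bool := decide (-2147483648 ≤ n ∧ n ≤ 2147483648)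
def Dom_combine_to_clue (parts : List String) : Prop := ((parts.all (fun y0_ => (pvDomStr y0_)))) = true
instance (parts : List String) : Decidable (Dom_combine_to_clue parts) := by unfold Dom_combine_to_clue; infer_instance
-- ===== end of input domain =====

-- B replaces A's done_last state machine by a recursion peeling maximal runs ('simpler'); equal wherever A returns (nonempty parts).

-- ===== PORT A =====
-- the loop body of A: state = (combined, prev, done_last), curr = parts[i]
def pvStepA (st : String × String × String) (curr : String) : String × String × String :=
  let (combined, prev, done_last) := st
  if curr != prev then (combined ++ curr, curr, "append")
  else
    let (combined, done_last) :=
      if done_last == "append" then (combined ++ "+", "add +") else (combined, done_last)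
    -- 'if done_last == "add +": pass' in A is a no-op
    (combined, curr, done_last)

def combine_to_clue (parts : List String) : String :=
  let first := PySem.List.pyGetD parts 0 ""   -- parts[0]; IndexError on [] is excluded by Pre_
  let st := (PySem.List.pyRange 1 parts.length 1).foldl
      (fun st i => pvStepA st (PySem.List.pyGetD parts i "")) (first, first, "append")
  st.1

-- ===== PORT B =====
def combine_to_clue_alt (parts : List String) : String :=
  match parts with
  | [] => ""
  | head :: rest =>
    let tail := rest.dropWhile (fun x => x == head)
    let dup := if tail.length < rest.length then "+" else ""
    head ++ dup ++ combine_to_clue_alt tail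
termination_by parts.length
decreasing_by
  simp only [List.length_cons]
  have := List.length_dropWhile_le (fun x => x == head) rest
  omega

-- ===== PRECONDITION & SPEC =====
-- A does parts[0]: it raises IndexError exactly on the empty list, so Pre_ excludes [].
def Pre_combine_to_clue (parts : List String) : Prop := parts ≠ []
instance (parts : List String) : Decidable (Pre_combine_to_clue parts) := by unfold Pre_combine_to_clue; infer_instance
def pvWitness_combine_to_clue : List String := ["a", "a", "b"]

def Spec_combine_to_clue (parts : List String) (out : String) : Prop := out = combine_to_clue_alt parts
instance (parts : List String) (out : String) : Decidable (Spec_combine_to_clue parts out) := by unfold Spec_combine_to_clue; infer_instance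

-- ===== CLAIM =====
def Claim_equal_combine_to_clue : Prop := ∀ (parts : List String), Dom_combine_to_clue parts → Pre_combine_to_clue parts → Spec_combine_to_clue parts (combine_to_clue parts)

-- ===== LEMMAS AND PROOFS =====

theorem alt_nil : combine_to_clue_alt [] = "" := by rw [combine_to_clue_alt]

theorem alt_cons (head : String) (rest : List String) :
    combine_to_clue_alt (head :: rest)
      = head ++ (if (rest.dropWhile (fun x => x == head)).length < rest.length then "+" else "")
          ++ combine_to_clue_alt (rest.dropWhile (fun x => x == head)) := by
  rw [combine_to_clue_alt]

-- Invariant of A's loop: from state (c, prev, d) with d ∈ {"append", "add +"},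
-- folding A's body over the remaining parts appends exactly B's output for those runs,
-- with a leading "+" iff d = "append" and the front of rest continues the run of prev.
theorem pvFoldA_eq (rest : List String) : ∀ (prev c d : String), d = "append" ∨ d = "add +" →
    (rest.foldl pvStepA (c, prev, d)).1
      = c ++ (if d = "append" ∧ (rest.dropWhile (fun x => x == prev)).length < rest.length then "+" else "")
          ++ combine_to_clue_alt (rest.dropWhile (fun x => x == prev)) := by
  induction rest with
  | nil =>
    intro prev c d _
    simp [alt_nil]
  | cons x rs ih =>
    intro prev c d hd
    by_cases hx : x = prev
    · subst hx
      have hdw : (x :: rs).dropWhile (fun y => y == x) = rs.dropWhile (fun y => y == x) := by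
        rw [List.dropWhile_cons]; simp
      have hlt : (rs.dropWhile (fun y => y == x)).length < (x :: rs).length := by
        have := List.length_dropWhile_le (fun y => y == x) rs
        simp; omega
      rcases hd with hd | hd <;> subst hd
      · have hstep : pvStepA (c, x, "append") x = (c ++ "+", x, "add +") := by
          simp [pvStepA]
        have h2 := ih x (c ++ "+") "add +" (Or.inr rfl)
        simp only [List.foldl_cons, hstep] at *
        rw [h2, hdw]
        simp [String.append_assoc]
        exact List.length_dropWhile_le _ _
      · have hstep : pvStepA (c, x, "add +") x = (c, x, "add +") := by
          simp [pvStepA]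
        have h2 := ih x c "add +" (Or.inr rfl)
        simp only [List.foldl_cons, hstep] at *
        rw [h2, hdw]
        simp
    · have hstep : pvStepA (c, prev, d) x = (c ++ x, x, "append") := by
        simp [pvStepA, hx]
      have hdw : (x :: rs).dropWhile (fun y => y == prev) = x :: rs := by
        rw [List.dropWhile_cons]; simp [hx]
      have h2 := ih x (c ++ x) "append" (Or.inl rfl)
      simp only [List.foldl_cons, hstep] at *
      rw [h2, hdw, alt_cons]
      simp [String.append_assoc]

-- ===== VERDICT =====
theorem combine_to_clue_spec : Claim_equal_combine_to_clue := by
  intro parts _hdom hpre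
  unfold Spec_combine_to_clue combine_to_clue
  match parts, hpre with
  | p :: rest, _ =>
    have hfold : (PySem.List.pyRange 1 (p :: rest).length 1).foldl
        (fun st i => pvStepA st (PySem.List.pyGetD (p :: rest) i ""))
        (PySem.List.pyGetD (p :: rest) 0 "", PySem.List.pyGetD (p :: rest) 0 "", "append")
        = rest.foldl pvStepA
            (PySem.List.pyGetD (p :: rest) 0 "", PySem.List.pyGetD (p :: rest) 0 "", "append") := by
      have := PySem.List.foldl_pyRange_pyGetD (xs := p :: rest) (a := 1) (f := pvStepA)
        (d := "") (init := (PySem.List.pyGetD (p :: rest) 0 "", PySem.List.pyGetD (p :: rest) 0 "", "append"))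
        (by norm_num)
      simpa using this
    simp only [hfold]
    have h0 : PySem.List.pyGetD (p :: rest) 0 "" = p := by
      simp [PySem.List.pyGetD, PySem.List.pyGet?, PySem.List.pyIdx?]
    rw [h0]
    rw [pvFoldA_eq rest p p "append" (Or.inl rfl), alt_cons]
    simp [String.append_assoc]
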